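-- pv_equiv track=rewrite | github.com/vpolonskyi/Lesson04 | task01.py | song
-- ===== SOURCE A (Python) =====
-- def song(l: int = 3, lines: int = 3, ex: int = 0):
--     assert l >= 1 and lines >= 1 and 0 <= ex <= 1
--     lin = 'la'
--     for i in range(1, l * lines):
--         if i % l:
--             lin = lin + '-la'
--         else:
--             lin = lin + '\nla'
--     if ex == 0:
--         return lin + '.'
--     return lin + '!'
-- ===== SOURCE B (Python) =====
-- def song(l: int = 3, lines: int = 3, ex: int = 0):
--     assert l >= 1 and lines >= 1 and 0 <= ex <= 1
--     line = '-'.join(['la'] * l)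
--     body = '\n'.join([line] * lines)
--     return body + ('.' if ex == 0 else '!')
-- ===== Notes on version B (the rewrite author's own statement) =====
-- stated objective: idiomatic
-- what changed: Replaces the single flat loop over range(1, l*lines) with a modulo branch by structural grouping: each line built as '-'.join(['la']*l), lines combined with '\n'.join, punctuation appended.
import Mathlib
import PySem

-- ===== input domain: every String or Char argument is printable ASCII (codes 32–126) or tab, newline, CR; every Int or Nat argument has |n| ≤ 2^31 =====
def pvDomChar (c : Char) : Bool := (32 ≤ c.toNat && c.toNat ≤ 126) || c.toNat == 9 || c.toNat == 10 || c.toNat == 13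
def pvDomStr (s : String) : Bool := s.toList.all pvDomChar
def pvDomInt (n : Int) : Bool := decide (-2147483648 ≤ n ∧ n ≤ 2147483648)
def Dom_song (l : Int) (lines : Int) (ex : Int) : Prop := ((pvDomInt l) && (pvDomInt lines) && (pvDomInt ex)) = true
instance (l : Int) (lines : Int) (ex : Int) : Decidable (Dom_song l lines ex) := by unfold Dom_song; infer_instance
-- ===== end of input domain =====

-- B replaces A's single flat loop-with-modulo by structural grouping: each line is
-- '-'.join of l copies of 'la', the lines are '\n'.join-ed, then the punctuation is appended (objective: idiomatic).

-- ===== PORT A =====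
def song (l : Int) (lines : Int) (ex : Int) : String :=
  let lin := (PySem.List.pyRange 1 (l * lines) 1).foldl
    (fun lin i => if PySem.Int.mod i l ≠ 0 then lin ++ "-la" else lin ++ "\nla") "la"
  if ex = 0 then lin ++ "." else lin ++ "!"

-- ===== PORT B =====
def song_alt (l : Int) (lines : Int) (ex : Int) : String :=
  let line := PySem.Str.join "-" (List.replicate l.toNat "la")
  let body := PySem.Str.join "\n" (List.replicate lines.toNat line)
  body ++ (if ex = 0 then "." else "!")

-- ===== PRECONDITION & SPEC =====
-- Pre_ excludes exactly the inputs on which A's (and B's) assert raises AssertionError.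
def Pre_song (l : Int) (lines : Int) (ex : Int) : Prop :=
  1 ≤ l ∧ 1 ≤ lines ∧ 0 ≤ ex ∧ ex ≤ 1
instance (l : Int) (lines : Int) (ex : Int) : Decidable (Pre_song l lines ex) := by
  unfold Pre_song; infer_instance
def pvWitness_song : Int × Int × Int := (3, 3, 0)

def Spec_song (l : Int) (lines : Int) (ex : Int) (out : String) : Prop := out = song_alt l lines ex
instance (l : Int) (lines : Int) (ex : Int) (out : String) : Decidable (Spec_song l lines ex out) := by
  unfold Spec_song; infer_instance

-- ===== CLAIM (what is proved, stated in full; the proofs are below) =====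
def Claim_equal_song : Prop := ∀ (l : Int) (lines : Int) (ex : Int),
  Dom_song l lines ex → Pre_song l lines ex → Spec_song l lines ex (song l lines ex)

-- ===== LEMMAS AND PROOFS =====

-- A's loop body, on the character-list side.
def stepC (l : Int) (cs : List Char) (i : Int) : List Char :=
  if PySem.Int.mod i l ≠ 0 then cs ++ "-la".toList else cs ++ "\nla".toList

lemma foldl_toList (l : Int) (rng : List Int) (s : String) :
    ((rng.foldl (fun lin i =>
        if PySem.Int.mod i l ≠ 0 then lin ++ "-la" else lin ++ "\nla") s)).toList
      = rng.foldl (stepC l) s.toList := by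
  induction rng generalizing s with
  | nil => rfl
  | cons a t ih =>
    simp only [List.foldl_cons, stepC]
    split_ifs with h <;> rw [ih] <;> simp [String.toList_append]

-- a run of indices with i % l ≠ 0 appends (b - a) copies of "-la"
lemma dash_run (l : Int) (k : Nat) : ∀ (a : Int) (s : List Char),
    (∀ i, a ≤ i → i < a + k → PySem.Int.mod i l ≠ 0) →
    (PySem.List.pyRange a (a + k) 1).foldl (stepC l) s
      = s ++ (List.replicate k "-la".toList).flatten := by
  induction k with
  | zero => intro a s _; simp [PySem.List.pyRange_one_eq_nil]
  | succ k ih =>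
    intro a s h
    rw [PySem.List.pyRange_one_cons (by omega)]
    simp only [List.foldl_cons]
    have hstep : stepC l s a = s ++ "-la".toList := by
      simp [stepC, h a le_rfl (by omega)]
    rw [hstep]
    rw [show (a + ((k:Nat) + 1 : Nat) : Int) = a + 1 + (k : Int) by push_cast; ring,
        ih (a + 1) (s ++ "-la".toList) (fun i h1 h2 => h i (by omega) (by push_cast at h2 ⊢; omega))]
    simp [List.replicate_succ, List.append_assoc]

lemma join_rep_step (sep x : List Char) (m : Nat) :
    PySem.Chars.join sep (List.replicate (m + 2) x)
      = x ++ sep ++ PySem.Chars.join sep (List.replicate (m + 1) x) := by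
  rw [show List.replicate (m + 2) x = x :: x :: List.replicate m x by simp [List.replicate_succ],
      PySem.Chars.join_cons_cons,
      show x :: List.replicate m x = List.replicate (m + 1) x from (List.replicate_succ ..).symm]

-- the single line: '-'.join of n+1 copies of 'la'
lemma line_eq (n : Nat) :
    PySem.Chars.join "-".toList (List.replicate (n + 1) "la".toList)
      = "la".toList ++ (List.replicate n "-la".toList).flatten := by
  induction n with
  | zero => simp [PySem.Chars.join_singleton]
  | succ n ih =>
    rw [join_rep_step, ih]
    have hd : "-la".toList = "-".toList ++ "la".toList := by decide
    simp [List.replicate_succ, hd]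

lemma join_replicate_succ (sep x : List Char) (m : Nat) :
    PySem.Chars.join sep (List.replicate (m + 2) x)
      = PySem.Chars.join sep (List.replicate (m + 1) x) ++ sep ++ x := by
  induction m with
  | zero => rw [join_rep_step]; simp [PySem.Chars.join_singleton]
  | succ m ih =>
    rw [join_rep_step, ih]
    have h2 : x ++ sep ++ PySem.Chars.join sep (List.replicate (m + 1) x)
        = PySem.Chars.join sep (List.replicate (m + 1) x) ++ sep ++ x :=
      (join_rep_step sep x m).symm.trans ih
    simp only [← List.append_assoc]
    rw [h2]

-- the whole body: the flat loop over range(1, n*m) builds m '\n'-joined lines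
lemma body_eq (n : Nat) (hn : 1 ≤ n) : ∀ (m : Nat),
    (PySem.List.pyRange 1 ((n : Int) * (((m : Nat) : Int) + 1)) 1).foldl (stepC (n : Int)) "la".toList
      = PySem.Chars.join "\n".toList
          (List.replicate (m + 1) (PySem.Chars.join "-".toList (List.replicate n "la".toList))) := by
  have hnd : ∀ a b i : Int, (n : Int) * a < i → i < (n : Int) * b → a + 1 = b →
      PySem.Int.mod i (n : Int) ≠ 0 := by
    intro a b i h1 h2 hab h
    rw [PySem.Int.mod_eq_zero_iff_dvd] at h
    obtain ⟨c, rfl⟩ := h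
    have hn' : (1 : Int) ≤ (n : Int) := by exact_mod_cast hn
    subst hab
    have : a < c := by nlinarith
    have : c < a + 1 := by nlinarith
    omega
  intro m
  induction m with
  | zero =>
    obtain ⟨n', rfl⟩ : ∃ n', n = n' + 1 := ⟨n - 1, by omega⟩
    rw [show ((n' + 1 : Nat) : Int) * ((((0:Nat) : Nat) : Int) + 1) = 1 + ((n' : Nat) : Int) by push_cast; ring]
    rw [dash_run _ n' 1 _ (fun i h1 h2 => hnd 0 1 i (by omega) (by push_cast at h2 ⊢; omega) (by ring))]
    rw [show (0 + 1 : Nat) = 1 from rfl, List.replicate_one, PySem.Chars.join_singleton, line_eq]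
  | succ m ih =>
    have hc : (((m + 1 : Nat) : Nat) : Int) = ((m : Nat) : Int) + 1 := by push_cast; ring
    rw [hc]
    have hn' : (1 : Int) ≤ (n : Int) := by exact_mod_cast hn
    have hsplit : PySem.List.pyRange 1 ((n : Int) * (((m : Nat) : Int) + 1 + 1)) 1
        = PySem.List.pyRange 1 ((n : Int) * (((m : Nat) : Int) + 1)) 1
          ++ PySem.List.pyRange ((n : Int) * (((m : Nat) : Int) + 1)) ((n : Int) * (((m : Nat) : Int) + 1 + 1)) 1 := by
      apply PySem.List.pyRange_one_append
      · nlinarith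
      · nlinarith
    rw [hsplit, List.foldl_append, ih]
    set B := (n : Int) * (((m : Nat) : Int) + 1) with hB
    have hcons : PySem.List.pyRange B ((n : Int) * (((m : Nat) : Int) + 1 + 1)) 1
        = B :: PySem.List.pyRange (B + 1) ((n : Int) * (((m : Nat) : Int) + 1 + 1)) 1 := by
      apply PySem.List.pyRange_one_cons
      rw [hB]; nlinarith
    rw [hcons]
    simp only [List.foldl_cons]
    have hmod : PySem.Int.mod B (n : Int) = 0 := by
      rw [PySem.Int.mod_eq_zero_iff_dvd]; exact ⟨((m : Nat) : Int) + 1, rfl⟩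
    have hstep : stepC (n : Int) (PySem.Chars.join "\n".toList
        (List.replicate (m + 1) (PySem.Chars.join "-".toList (List.replicate n "la".toList)))) B
        = PySem.Chars.join "\n".toList
            (List.replicate (m + 1) (PySem.Chars.join "-".toList (List.replicate n "la".toList)))
          ++ "\nla".toList := by
      simp [stepC, hmod]
    rw [hstep]
    obtain ⟨n', rfl⟩ : ∃ n', n = n' + 1 := ⟨n - 1, by omega⟩
    have hend : ((n' + 1 : Nat) : Int) * (((m : Nat) : Int) + 1 + 1) = B + 1 + ((n' : Nat) : Int) := by
      rw [hB]; push_cast; ring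
    rw [hend, dash_run _ n' (B + 1) _ (fun i h1 h2 => by
      refine hnd (((m : Nat) : Int) + 1) (((m : Nat) : Int) + 1 + 1) i (by rw [← hB]; omega) ?_ (by ring)
      rw [hend]; exact h2)]
    rw [join_replicate_succ, line_eq]
    have hd : "\nla".toList = "\n".toList ++ "la".toList := by decide
    simp [hd, List.append_assoc]

-- ===== VERDICT (by name: the statement is the Claim_ definition above) =====
theorem song_spec : Claim_equal_song := by
  intro l lines ex _ hpre
  obtain ⟨hl, hlines, _, _⟩ := hpre
  unfold Spec_song song song_alt
  apply String.toList_inj.mp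
  obtain ⟨n, rfl⟩ : ∃ n : Nat, l = (n : Int) := ⟨l.toNat, (Int.toNat_of_nonneg (by omega)).symm⟩
  obtain ⟨m, rfl⟩ : ∃ m : Nat, lines = (m : Int) := ⟨lines.toNat, (Int.toNat_of_nonneg (by omega)).symm⟩
  have hn : 1 ≤ n := by exact_mod_cast hl
  have hm : 1 ≤ m := by exact_mod_cast hlines
  obtain ⟨m', rfl⟩ : ∃ m', m = m' + 1 := ⟨m - 1, by omega⟩
  have hbody := body_eq n hn m'
  rw [show (((m' : Nat) : Int) + 1) = (((m' + 1 : Nat) : Nat) : Int) by push_cast; ring] at hbody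
  split_ifs <;>
    simp only [String.toList_append, foldl_toList, PySem.Str.toList_join, List.map_replicate,
      Int.toNat_natCast, hbody]
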